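-- pv_equiv track=rewrite | github.com/agentlans/sign | acronym_algo.py | spell_acronym
-- ===== SOURCE A (Python) =====
-- def binary_lists(length):
--   "Returns a list of binary lists of specified length."
--   if length == 1:
--     return [[0], [1]]
--   else:
--     bl = binary_lists(length - 1)
--     return [[0] + x for x in bl] + [[1] + x for x in bl]
--
-- def indices_of_1(binary_list):
--   "Returns indices of binary_list that are equal to 1."
--   temp = []
--   for i, v in enumerate(binary_list):
--     if v == 1:
--       temp.append(i)
--   return temp
--
-- def split_at(string, breakpoints):
--   "Splits string just before the given indices."
--   bp = [0] + breakpoints + [len(string)]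
--   temp = []
--   for i in range(len(bp) - 1):
--     temp.append(string[bp[i]:bp[i+1]])
--   return temp
--
-- def split_string(string):
--   "Lists all the ways a string can be taken apart."
--   temp = []
--   for blist in binary_lists(len(string) - 1):
--     cleavage = indices_of_1(blist)
--     temp.append(split_at(string, list(map(lambda x: x + 1, cleavage))))
--   return temp
--
-- def highlight(string, start, end):
--   "Capitalizes part of a string from [start, end)"
--   return string[0:start] + string[start:end].upper() + string[end:]
--
-- def find_part(string, vocabulary):
--   '''Searches for words in vocabulary that contain the given string
-- and highlights those parts in those words'''
--   sl = len(string)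
--   temp = []
--   for word in vocabulary:
--     found_index = word.find(string)
--     # We only want parts that start at beginning of word.
--     # You can change this to -1 if you want parts anywhere within word.
--     if found_index == 0:
--       temp.append(highlight(word, found_index, found_index+sl))
--   return temp
--
-- def spell_acronym(string, vocabulary):
--   '''Breaks string into parts and finds parts of words in vocabulary that
-- contain those parts.'''
--   expansions = [] # To hold our acronym expansions
--   # Split the string every possible way
--   str_parts = split_string(string)
--   # For each pattern, find words that match
--   for pattern in str_parts:
--     expansion = [find_part(x, vocabulary) for x in pattern]
--     # If we can spell the whole acronym then we save it
--     if not ([] in expansion):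
--       expansions.append(expansion)
--   return expansions
-- ===== SOURCE B (Python) =====
-- def spell_acronym(string, vocabulary):
--     '''Breaks string into parts and finds parts of words in vocabulary that
-- contain those parts.'''
--     n = len(string)
--     # exps[n - i] holds the valid expansions of the suffix string[i:],
--     # computed once and shared by every split that cuts at position i.
--     exps = [[[]]]
--     for i in range(n - 1, -1, -1):
--         acc = []
--         # longer first parts come first (matches enumeration order of splits)
--         for j in range(n, i, -1):
--             sl = j - i
--             part = string[i:j]
--             matches = [w[:sl].upper() + w[sl:] for w in vocabulary
--                        if w.startswith(part)]
--             if matches: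
--                 for rest in exps[n - j]:
--                     acc.append([matches] + rest)
--         exps.append(acc)
--     return exps[n]
-- ===== Notes on version B (the rewrite author's own statement) =====
-- stated objective: alternative
-- what changed: A enumerates all 2^(n-1) binary split masks and recomputes vocabulary matches for every part of every split; B is a suffix dynamic program that computes the match list of each substring once and the valid expansions of each suffix once, sharing them across splits and pruning splits with an unmatched part (intended as faster; measured 1572x at n=16 where A times out, but unconfirmed at larger sizes because the returned expansion list itself can be exponentially large).
import Mathlib
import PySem

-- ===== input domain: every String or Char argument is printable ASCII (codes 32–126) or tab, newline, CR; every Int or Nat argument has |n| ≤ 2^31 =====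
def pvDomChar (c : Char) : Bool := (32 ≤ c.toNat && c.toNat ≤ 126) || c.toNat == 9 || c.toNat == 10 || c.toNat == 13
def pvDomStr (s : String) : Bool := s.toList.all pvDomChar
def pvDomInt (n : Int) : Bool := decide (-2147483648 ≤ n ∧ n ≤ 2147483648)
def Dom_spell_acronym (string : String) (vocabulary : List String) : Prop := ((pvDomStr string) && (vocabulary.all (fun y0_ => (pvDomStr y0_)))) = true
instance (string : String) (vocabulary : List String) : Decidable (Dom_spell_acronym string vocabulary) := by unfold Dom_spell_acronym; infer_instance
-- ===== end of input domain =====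

-- B replaces A's 2^(n-1) enumeration of binary split masks by a suffix DP that computes the valid
-- expansions of every suffix once and shares them across all splits (objective: alternative).


-- ===== PORT A =====
-- Python's binary_lists recurses without bound for length ≤ 0 (RecursionError); that happens exactly
-- when len(string) ≤ 1, which Pre_ excludes, so the value returned at 0 here is never reached.
def binary_lists : Nat → List (List Int)
  | 0 => []
  | 1 => [[0], [1]]
  | n + 2 =>
    let bl := binary_lists (n + 1)
    bl.map (fun x => 0 :: x) ++ bl.map (fun x => 1 :: x)

def indices_of_1 (binary_list : List Int) : List Int :=
  (PySem.List.enumerate binary_list).foldl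
    (fun temp iv => if iv.2 = 1 then temp ++ [iv.1] else temp) []

def split_at (s : List Char) (breakpoints : List Int) : List (List Char) :=
  let bp : List Int := [0] ++ breakpoints ++ [PySem.List.len s]
  (PySem.List.pyRange 0 (PySem.List.len bp - 1) 1).foldl
    (fun temp i =>
      temp ++ [PySem.List.slice s (some (PySem.List.pyGetD bp i 0)) (some (PySem.List.pyGetD bp (i + 1) 0))]) []

def split_string (s : List Char) : List (List (List Char)) :=
  (binary_lists (s.length - 1)).foldl
    (fun temp blist =>
      temp ++ [split_at s ((indices_of_1 blist).map (fun x => x + 1))]) []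

def highlight (word : List Char) (start stop : Int) : List Char :=
  PySem.List.slice word (some 0) (some start) ++
    PySem.Chars.upper (PySem.List.slice word (some start) (some stop)) ++
    PySem.List.slice word (some stop) none

def find_part (s : List Char) (vocabulary : List String) : List String :=
  let sl := PySem.List.len s
  vocabulary.foldl
    (fun temp word =>
      let found_index := PySem.Chars.find word.toList s
      if found_index = 0 then
        temp ++ [String.ofList (highlight word.toList found_index (found_index + sl))]
      else temp) []

def spell_acronym (string : String) (vocabulary : List String) : List (List (List String)) :=
  (split_string string.toList).foldl
    (fun expansions pattern =>
      let expansion := pattern.map (fun x => find_part x vocabulary)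
      if ¬ ([] ∈ expansion) then expansions ++ [expansion] else expansions) []

-- ===== PORT B =====
def spell_acronym_alt (string : String) (vocabulary : List String) : List (List (List String)) :=
  let s := string.toList
  let n : Int := PySem.List.len s
  let exps : List (List (List (List String))) :=
    (PySem.List.pyRange (n - 1) (-1) (-1)).foldl
      (fun exps i =>
        let acc :=
          (PySem.List.pyRange n i (-1)).foldl
            (fun acc j =>
              let sl := j - i
              let part := PySem.List.slice s (some i) (some j)
              let mtch :=
                (vocabulary.filter (fun w => PySem.Chars.startswith w.toList part)).map
                  (fun w => String.ofList
                    (PySem.Chars.upper (PySem.List.slice w.toList none (some sl)) ++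
                      PySem.List.slice w.toList (some sl) none))
              if mtch.isEmpty then acc
              else acc ++ (PySem.List.pyGetD exps (n - j) []).map (fun rest => mtch :: rest)) []
        exps ++ [acc])
      [[[]]]
  PySem.List.pyGetD exps n []

-- ===== PRECONDITION & SPEC =====
-- Pre_ excludes strings of length ≤ 1: there Python A's binary_lists(len-1) recurses without bound
-- and raises RecursionError, so A returns no value (B returns the natural value there).
def Pre_spell_acronym (string : String) (vocabulary : List String) : Prop :=
  2 ≤ string.toList.length
instance (string : String) (vocabulary : List String) : Decidable (Pre_spell_acronym string vocabulary) := by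
  unfold Pre_spell_acronym; infer_instance
def pvWitness_spell_acronym : String × List String := ("ab", ["apple", "big"])

def Spec_spell_acronym (string : String) (vocabulary : List String) (out : List (List (List String))) : Prop :=
  out = spell_acronym_alt string vocabulary
instance (string : String) (vocabulary : List String) (out : List (List (List String))) : Decidable (Spec_spell_acronym string vocabulary out) := by
  unfold Spec_spell_acronym; infer_instance

-- ===== CLAIM (what is proved, stated in full; the proofs are below) =====
def Claim_equal_spell_acronym : Prop := ∀ (string : String) (vocabulary : List String), Dom_spell_acronym string vocabulary → Pre_spell_acronym string vocabulary → Spec_spell_acronym string vocabulary (spell_acronym string vocabulary)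

-- ===== LEMMAS AND PROOFS =====

-- reference semantics: Mf = the matches of one part; EB = the valid expansions of a string
def hlF (w : List Char) (sl : Nat) : String :=
  String.ofList (PySem.Chars.upper (List.take sl w) ++ List.drop sl w)

def Mf (v : List String) (part : List Char) : List String :=
  (v.filter (fun w => PySem.Chars.startswith w.toList part)).map (fun w => hlF w.toList part.length)

def EB (v : List String) : List Char → List (List (List String))
  | [] => [[]]
  | c :: t =>
    ((List.range (t.length + 1)).reverse).flatMap (fun L =>
      let m := Mf v ((c :: t).take (L + 1))
      if m = [] then [] else (EB v ((c :: t).drop (L + 1))).map (m :: ·))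
termination_by s => s.length
decreasing_by simp

def EBa (v : List String) (s : List Char) (K : Nat) : List (List (List String)) :=
  ((List.range K).reverse).flatMap (fun L =>
    let m := Mf v (s.take (L + 1))
    if m = [] then [] else (EB v (s.drop (L + 1))).map (m :: ·))

def SPL : List Char → List (List (List Char))
  | [] => [[]]
  | c :: t =>
    ((List.range (t.length + 1)).reverse).flatMap (fun L =>
      (SPL ((c :: t).drop (L + 1))).map (((c :: t).take (L + 1)) :: ·))
termination_by s => s.length
decreasing_by simp

def SPLa (s : List Char) (K : Nat) : List (List (List Char)) :=
  ((List.range K).reverse).flatMap (fun L =>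
    (SPL (s.drop (L + 1))).map ((s.take (L + 1)) :: ·))

def mFirst (c : Char) : List (List Char) → List (List Char)
  | [] => []
  | p :: ps => (c :: p) :: ps

def chop (s : List Char) (a : Int) : List Int → List (List Char)
  | [] => [PySem.List.slice s (some a) (some (PySem.List.len s))]
  | b :: rest => PySem.List.slice s (some a) (some b) :: chop s b rest

def gfun (s : List Char) (bl : List Int) : List (List Char) :=
  split_at s ((indices_of_1 bl).map (fun x => x + 1))

theorem EB_cons (v : List String) (c : Char) (t : List Char) :
    EB v (c :: t) = EBa v (c :: t) (t.length + 1) := by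
  simp only [EB, EBa]

theorem EBa_succ (v : List String) (s : List Char) (K : Nat) :
    EBa v s (K + 1) =
      (if Mf v (s.take (K + 1)) = [] then []
       else (EB v (s.drop (K + 1))).map (Mf v (s.take (K + 1)) :: ·)) ++ EBa v s K := by
  unfold EBa
  rw [List.range_succ, List.reverse_append]
  simp

theorem SPL_cons (c : Char) (t : List Char) :
    SPL (c :: t) = SPLa (c :: t) (t.length + 1) := by
  simp only [SPL, SPLa]

theorem SPLa_succ (s : List Char) (K : Nat) :
    SPLa s (K + 1) = (SPL (s.drop (K + 1))).map ((s.take (K + 1)) :: ·) ++ SPLa s K := by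
  unfold SPLa
  rw [List.range_succ, List.reverse_append]
  simp

theorem find_zero_iff (w s : List Char) : PySem.Chars.find w s = 0 ↔ s <+: w := by
  constructor
  · intro h
    have h0 : (0:Int) ≤ PySem.Chars.find w s := le_of_eq h.symm
    have hs := (PySem.Chars.find_spec h0).1
    rw [h] at hs; simpa using hs
  · intro h
    have h0 : 0 ≤ PySem.Chars.find w s := (PySem.Chars.find_nonneg_iff w s).2 h.isInfix
    by_contra hne
    have hpos : 0 < (PySem.Chars.find w s).toNat := by omega
    exact (PySem.Chars.find_spec h0).2 0 hpos (by simpa using h)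

theorem highlight_eq (w : List Char) (sl : Nat) :
    highlight w 0 (0 + (sl : Int)) = PySem.Chars.upper (List.take sl w) ++ List.drop sl w := by
  unfold highlight
  simp [pysem]

theorem find_part_eq_M (s : List Char) (v : List String) : find_part s v = Mf v s := by
  unfold find_part
  dsimp only
  refine Eq.trans (PySem.List.foldl_append_ite
      (fun word => PySem.Chars.find word.toList s = 0)
      (fun word => String.ofList (highlight word.toList (PySem.Chars.find word.toList s)
        (PySem.Chars.find word.toList s + PySem.List.len s))) v []) ?_
  rw [List.nil_append]
  unfold Mf
  rw [List.filter_congr (q := fun w => PySem.Chars.startswith w.toList s)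
      (fun w _ => by rw [Bool.eq_iff_iff]; simp [find_zero_iff, PySem.Chars.startswith_iff])]
  apply List.map_congr_left
  intro w hw
  have h0 : PySem.Chars.find w.toList s = 0 := by
    have := (List.mem_filter.1 hw).2
    rw [PySem.Chars.startswith_iff] at this
    exact (find_zero_iff _ _).2 this
  rw [h0, PySem.List.len_eq, highlight_eq]
  rfl

theorem enum_shift (x : List Int) : ∀ (k : Int) (acc : List Int),
    (PySem.List.enumerate x k).foldl (fun temp iv => if iv.2 = 1 then temp ++ [iv.1] else temp) acc
      = acc ++ (indices_of_1 x).map (· + k) := by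
  induction x with
  | nil => intro k acc; simp [PySem.List.enumerate, indices_of_1]
  | cons b x ih =>
    intro k acc
    have he : ∀ (m : Int), PySem.List.enumerate (b :: x) m = (m, b) :: PySem.List.enumerate x (m + 1) :=
      fun m => rfl
    rw [he, List.foldl_cons, ih]
    have hr : indices_of_1 (b :: x) = (if b = 1 then [(0:Int)] else []) ++ (indices_of_1 x).map (· + 1) := by
      unfold indices_of_1
      rw [he, List.foldl_cons, ih]
      by_cases hb : b = 1 <;> simp [hb] <;> rfl
    rw [hr]
    simp only [List.map_append, List.map_map]
    have hcomp : ((fun x => x + k) ∘ fun x : Int => x + 1) = (fun x : Int => x + (k + 1)) :=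
      funext fun y => by simp; ring
    rw [hcomp]
    by_cases hb : b = 1 <;> simp [hb, List.append_assoc]

theorem ind_cons (b : Int) (x : List Int) :
    indices_of_1 (b :: x) = (if b = 1 then [0] else []) ++ (indices_of_1 x).map (· + 1) := by
  unfold indices_of_1
  rw [show PySem.List.enumerate (b :: x) 0 = (0, b) :: PySem.List.enumerate x 1 from rfl,
    List.foldl_cons, enum_shift]
  simp [indices_of_1]

theorem ind_nonneg (x : List Int) : ∀ y ∈ indices_of_1 x, 0 ≤ y := by
  induction x with
  | nil => simp [indices_of_1, PySem.List.enumerate]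
  | cons b x ih =>
    intro y hy
    rw [ind_cons] at hy
    rcases List.mem_append.1 hy with h | h
    · by_cases hb : b = 1 <;> simp [hb] at h; omega
    · obtain ⟨z, hz, rfl⟩ := List.mem_map.1 h
      have := ih z hz; omega

theorem consec (s : List Char) (q : List Int) : ∀ (a : Int),
    (List.range (q.length + 1)).map
      (fun i => PySem.List.slice s (some ((a :: (q ++ [PySem.List.len s])).getD i 0))
        (some ((a :: (q ++ [PySem.List.len s])).getD (i + 1) 0)))
      = chop s a q := by
  induction q with
  | nil => intro a; simp [chop, List.range_succ]
  | cons b rest ih =>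
    intro a
    rw [show (b :: rest).length + 1 = (rest.length + 1) + 1 by simp, List.range_succ_eq_map]
    rw [List.map_cons, List.map_map]
    unfold chop
    congr 1
    rw [← ih b]
    apply List.map_congr_left
    intro i _
    rfl

theorem split_at_eq (s : List Char) (q : List Int) : split_at s q = chop s 0 q := by
  unfold split_at
  dsimp only
  rw [PySem.List.foldl_append_singleton_eq_map, List.nil_append]
  have hlen : PySem.List.len ([(0:Int)] ++ q ++ [PySem.List.len s]) - 1 = ((q.length + 1 : Nat) : Int) := by
    simp [PySem.List.len_eq]
  rw [hlen, PySem.List.pyRange_zero_nat, List.map_map]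
  rw [← consec s q 0]
  apply List.map_congr_left
  intro i _
  simp only [Function.comp]
  rw [PySem.List.pyGetD_natCast]
  have : ((i : Int) + 1) = ((i + 1 : Nat) : Int) := by push_cast; ring
  rw [this, PySem.List.pyGetD_natCast]
  rfl

theorem slice_cons_shift (c : Char) (s : List Char) (a b : Int) (ha : 0 ≤ a) (hb : 0 ≤ b) :
    PySem.List.slice (c :: s) (some (a + 1)) (some (b + 1)) = PySem.List.slice s (some a) (some b) := by
  rw [PySem.List.slice_toNat _ (by omega) (by omega), PySem.List.slice_toNat _ ha hb]
  rw [show (a + 1).toNat = a.toNat + 1 by omega, show (b + 1).toNat = b.toNat + 1 by omega]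
  rw [List.drop_succ_cons, Nat.succ_sub_succ]

theorem len_cons (c : Char) (s : List Char) : PySem.List.len (c :: s) = PySem.List.len s + 1 := by
  simp [PySem.List.len_eq]

theorem chop_shift (c : Char) (s : List Char) (q : List Int) : ∀ (a : Int), 0 ≤ a →
    (∀ y ∈ q, 0 ≤ y) →
    chop (c :: s) (a + 1) (q.map (· + 1)) = chop s a q := by
  induction q with
  | nil =>
    intro a ha _
    simp only [List.map_nil]
    unfold chop
    rw [len_cons, slice_cons_shift c s a (PySem.List.len s) ha (by simp [PySem.List.len_eq])]
  | cons b rest ih =>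
    intro a ha hq
    simp only [List.map_cons]
    unfold chop
    rw [slice_cons_shift c s a b ha (hq b (by simp)),
      ih b (hq b (by simp)) (fun y hy => hq y (by simp [hy]))]

theorem slice_zero_succ (c : Char) (t : List Char) (b : Int) (hb : 0 ≤ b) :
    PySem.List.slice (c :: t) (some 0) (some (b + 1)) = c :: PySem.List.slice t (some 0) (some b) := by
  rw [PySem.List.slice_toNat _ (by omega) (by omega), PySem.List.slice_toNat _ (by omega) hb]
  rw [show (b + 1).toNat = b.toNat + 1 by omega]
  simp

theorem slice_all (s : List Char) : PySem.List.slice s (some 0) (some (PySem.List.len s)) = s := by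
  rw [PySem.List.len_eq, show ((s.length : Int)) = ((s.length : Nat) : Int) from rfl]
  rw [PySem.List.slice_toNat _ (by omega) (by omega)]
  simp

theorem ga (c : Char) (t : List Char) (x : List Int) :
    gfun (c :: t) (0 :: x) = mFirst c (gfun t x) := by
  unfold gfun
  rw [ind_cons]
  simp only [if_neg (by norm_num : ¬ (0:Int) = 1), List.nil_append, List.map_map]
  rw [split_at_eq, split_at_eq]
  cases hq : (indices_of_1 x).map (fun x => x + 1) with
  | nil =>
    have h2 : (indices_of_1 x).map ((fun x : Int => x + 1) ∘ fun x : Int => x + 1) = [] := by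
      have := congrArg (List.map (fun y : Int => y + 1)) hq
      simpa [List.map_map] using this
    rw [h2]
    show [PySem.List.slice (c :: t) (some 0) (some (PySem.List.len (c :: t)))]
      = mFirst c [PySem.List.slice t (some 0) (some (PySem.List.len t))]
    rw [slice_all, slice_all]
    rfl
  | cons b rest =>
    have hmap : (indices_of_1 x).map ((fun x : Int => x + 1) ∘ fun x : Int => x + 1)
        = (b + 1) :: rest.map (fun y : Int => y + 1) := by
      have := congrArg (List.map (fun y : Int => y + 1)) hq
      simpa [List.map_map] using this
    have hnn : ∀ y ∈ b :: rest, 0 ≤ y := by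
      intro y hy
      rw [← hq] at hy
      obtain ⟨z, hz, rfl⟩ := List.mem_map.1 hy
      have := ind_nonneg x z hz; omega
    have hb : (0:Int) ≤ b := hnn b (by simp)
    rw [hmap]
    show PySem.List.slice (c :: t) (some 0) (some (b + 1))
        :: chop (c :: t) (b + 1) (rest.map (fun y : Int => y + 1))
      = mFirst c (PySem.List.slice t (some 0) (some b) :: chop t b rest)
    rw [slice_zero_succ c t b hb,
      chop_shift c t rest b hb (fun y hy => hnn y (by simp [hy]))]
    rfl

theorem gb (c : Char) (t : List Char) (x : List Int) :
    gfun (c :: t) (1 :: x) = [c] :: gfun t x := by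
  unfold gfun
  rw [ind_cons, if_pos rfl]
  simp only [List.cons_append, List.nil_append, List.map_cons, List.map_map]
  rw [split_at_eq, split_at_eq]
  have hmap : (indices_of_1 x).map ((fun x : Int => x + 1) ∘ fun x : Int => x + 1)
      = ((indices_of_1 x).map (fun y : Int => y + 1)).map (fun y : Int => y + 1) := by
    simp [List.map_map]
  rw [hmap]
  show PySem.List.slice (c :: t) (some 0) (some (0 + 1))
      :: chop (c :: t) (0 + 1) (((indices_of_1 x).map (fun y : Int => y + 1)).map (fun y : Int => y + 1))
    = [c] :: chop t 0 ((indices_of_1 x).map (fun y : Int => y + 1))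
  rw [chop_shift c t _ 0 le_rfl (by
    intro y hy
    obtain ⟨z, hz, rfl⟩ := List.mem_map.1 hy
    have := ind_nonneg x z hz; omega)]
  rw [slice_zero_succ c t 0 le_rfl]
  congr 1

theorem SPL_nil : SPL [] = [[]] := by simp [SPL]

theorem EB_nil (v : List String) : EB v [] = [[]] := by simp [EB]

theorem SPLa_zero (s : List Char) : SPLa s 0 = [] := by simp [SPLa]

theorem EBa_zero (v : List String) (s : List Char) : EBa v s 0 = [] := by simp [EBa]

theorem SPLa_cons_step (c : Char) (t : List Char) (K : Nat) :
    SPLa (c :: t) (K + 1) = (SPLa t K).map (mFirst c) ++ (SPL t).map (List.cons [c]) := by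
  induction K with
  | zero =>
    rw [SPLa_succ, SPLa_zero, SPLa_zero]
    simp
  | succ K ih =>
    rw [SPLa_succ, ih, SPLa_succ]
    rw [List.map_append, List.append_assoc]
    congr 1
    rw [List.map_map]
    rfl

theorem SPL_reindex (c : Char) (t : List Char) (ht : t ≠ []) :
    SPL (c :: t) = (SPL t).map (mFirst c) ++ (SPL t).map (List.cons [c]) := by
  cases t with
  | nil => exact absurd rfl ht
  | cons d t' =>
    rw [SPL_cons]
    simp only [List.length_cons]
    rw [SPLa_cons_step, ← SPL_cons]

theorem split_eq_SPL (c : Char) (t : List Char) (ht : 1 ≤ t.length) :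
    (binary_lists ((c :: t).length - 1)).map (gfun (c :: t)) = SPL (c :: t) := by
  induction t generalizing c with
  | nil => simp at ht
  | cons d t' ih =>
    cases t' with
    | nil =>
      have hg : gfun [d] [] = [[d]] := by
        unfold gfun
        rw [show (indices_of_1 []).map (fun x => x + 1) = [] from rfl, split_at_eq]
        unfold chop
        rw [slice_all]
      show (binary_lists 1).map (gfun (c :: [d])) = SPL (c :: [d])
      rw [show binary_lists 1 = [[0], [1]] from rfl]
      rw [show ([[0], [1]] : List (List Int)).map (gfun (c :: [d]))
          = [gfun (c :: [d]) (0 :: []), gfun (c :: [d]) (1 :: [])] from rfl]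
      rw [ga, gb, hg]
      rw [SPL_cons, show ([d].length + 1) = 1 + 1 from rfl, SPLa_cons_step,
        SPLa_succ, SPLa_zero, SPL_cons]
      simp [SPLa_succ, SPLa_zero, SPL_nil]
    | cons e t'' =>
      show (binary_lists ((d :: e :: t'').length)).map (gfun (c :: d :: e :: t''))
        = SPL (c :: d :: e :: t'')
      rw [show (d :: e :: t'').length = t''.length + 2 by simp, binary_lists]
      have hbl : binary_lists (t''.length + 1) = binary_lists ((d :: e :: t'').length - 1) := by
        norm_num
      simp only [List.map_append, List.map_map]
      rw [List.map_congr_left (l := binary_lists (t''.length + 1))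
          (f := gfun (c :: d :: e :: t'') ∘ (fun x => 0 :: x))
          (g := mFirst c ∘ gfun (d :: e :: t'')) (fun bl _ => ga c (d :: e :: t'') bl),
        List.map_congr_left (l := binary_lists (t''.length + 1))
          (f := gfun (c :: d :: e :: t'') ∘ (fun x => 1 :: x))
          (g := List.cons [c] ∘ gfun (d :: e :: t'')) (fun bl _ => gb c (d :: e :: t'') bl)]
      rw [← List.map_map (g := mFirst c), ← List.map_map (g := List.cons [c]), hbl,
        ih d (by simp)]
      rw [SPL_reindex c (d :: e :: t'') (by simp)]

theorem FM_aux (v : List String) : ∀ (n : Nat) (s : List Char), s.length ≤ n →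
    ((SPL s).filter (fun pat => decide (¬ [] ∈ pat.map (Mf v)))).map (fun pat => pat.map (Mf v))
      = EB v s := by
  intro n
  induction n with
  | zero =>
    intro s hs
    have hnil : s = [] := List.eq_nil_of_length_eq_zero (by omega)
    subst hnil
    rw [SPL_nil, EB_nil]
    rfl
  | succ n ihn =>
    intro s hs
    cases s with
    | nil => rw [SPL_nil, EB_nil]; rfl
    | cons c t =>
      rw [SPL_cons, EB_cons]
      have inner : ∀ K : Nat,
          ((SPLa (c :: t) K).filter (fun pat => decide (¬ [] ∈ pat.map (Mf v)))).map
            (fun pat => pat.map (Mf v)) = EBa v (c :: t) K := by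
        intro K
        induction K with
        | zero => rw [SPLa_zero, EBa_zero]; rfl
        | succ K ihK =>
          rw [SPLa_succ, EBa_succ]
          rw [List.filter_append, List.map_append, ihK]
          congr 1
          rw [List.filter_map]
          by_cases hM : Mf v ((c :: t).take (K + 1)) = []
          · rw [if_pos hM]
            rw [List.filter_congr (q := fun _ => false)
                (fun r _ => by
                  have hM' : Mf v (c :: List.take K t) = [] := by
                    rw [← List.take_succ_cons]; exact hM
                  simp [Function.comp, hM'])]
            simp
          · rw [if_neg hM]
            rw [List.filter_congr (q := fun r => decide (¬ [] ∈ r.map (Mf v)))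
                (fun r _ => by
                  have hne : ¬ ([] = Mf v (c :: List.take K t)) := fun h => by
                    rw [← List.take_succ_cons] at h; exact hM h.symm
                  simp [Function.comp, hne])]
            rw [List.map_map]
            rw [show ((fun pat => pat.map (Mf v)) ∘ ((c :: t).take (K + 1) :: ·))
                = (Mf v ((c :: t).take (K + 1)) :: ·) ∘ (fun pat => pat.map (Mf v)) from rfl]
            rw [← List.map_map]
            rw [ihn ((c :: t).drop (K + 1)) (by simp at hs ⊢; omega)]
      exact inner (t.length + 1)

theorem FM_eq (v : List String) (s : List Char) :
    ((SPL s).filter (fun pat => decide (¬ [] ∈ pat.map (Mf v)))).map (fun pat => pat.map (Mf v))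
      = EB v s :=
  FM_aux v s.length s le_rfl

theorem A_eq (string : String) (v : List String) (h : 2 ≤ string.toList.length) :
    spell_acronym string v = EB v string.toList := by
  obtain ⟨c, t, hct⟩ : ∃ c t, string.toList = c :: t := by
    cases hs : string.toList with
    | nil => rw [hs] at h; simp at h
    | cons c t => exact ⟨c, t, rfl⟩
  have ht : 1 ≤ t.length := by rw [hct] at h; simp at h; omega
  unfold spell_acronym
  dsimp only
  refine Eq.trans (PySem.List.foldl_append_ite
      (fun pattern => ¬ [] ∈ pattern.map (fun x => find_part x v))
      (fun pattern => pattern.map (fun x => find_part x v))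
      (split_string string.toList) []) ?_
  rw [List.nil_append]
  have hfp : (fun x => find_part x v) = Mf v := funext fun x => find_part_eq_M x v
  rw [hfp]
  have hss : split_string string.toList
      = (binary_lists (string.toList.length - 1)).map (gfun string.toList) :=
    PySem.List.foldl_append_singleton_eq_map _ _ _
  rw [hss, hct, split_eq_SPL c t ht]
  exact FM_eq v (c :: t)

def mtchOf (v : List String) (s : List Char) (i j : Int) : List String :=
  (v.filter (fun w => PySem.Chars.startswith w.toList (PySem.List.slice s (some i) (some j)))).map
    (fun w => String.ofList (PySem.Chars.upper (PySem.List.slice w.toList none (some (j - i))) ++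
      PySem.List.slice w.toList (some (j - i)) none))

def istep (v : List String) (s : List Char) (i : Int) (exps : List (List (List (List String)))) :
    List (List (List String)) → Int → List (List (List String)) :=
  fun acc j =>
    if (mtchOf v s i j).isEmpty then acc
    else acc ++ (PySem.List.pyGetD exps (((s.length : Nat) : Int) - j) []).map
      (fun rest => mtchOf v s i j :: rest)

def ostep (v : List String) (s : List Char) :
    List (List (List (List String))) → Int → List (List (List (List String))) :=
  fun exps i =>
    exps ++ [(PySem.List.pyRange ((s.length : Nat) : Int) i (-1)).foldl (istep v s i exps) []]

def stateAt (v : List String) (s : List Char) (i : Nat) : List (List (List (List String))) :=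
  (List.range (s.length - i + 1)).map (fun k => EB v (s.drop (s.length - k)))

theorem mtch_eq (v : List String) (s : List Char) (i d : Nat) (h : i + (d + 1) ≤ s.length) :
    mtchOf v s (i : Int) ((i + (d + 1) : Nat) : Int) = Mf v ((s.drop i).take (d + 1)) := by
  unfold mtchOf Mf
  rw [show ((i + (d + 1) : Nat) : Int) - (i : Int) = ((d + 1 : Nat) : Int) by push_cast; ring]
  rw [PySem.List.slice_natCast, show i + (d + 1) - i = d + 1 by omega]
  apply List.map_congr_left
  intro w _
  rw [PySem.List.slice_to_natCast, PySem.List.slice_from_natCast]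
  unfold hlF
  rw [show ((s.drop i).take (d + 1)).length = d + 1 by simp; omega]

theorem stateAt_last (v : List String) (s : List Char) (i : Nat) (hi : i < s.length) :
    stateAt v s i = stateAt v s (i + 1) ++ [EB v (s.drop i)] := by
  unfold stateAt
  rw [show s.length - i + 1 = (s.length - (i + 1) + 1) + 1 by omega, List.range_succ,
    List.map_append]
  congr 1
  rw [List.map_cons, List.map_nil]
  rw [show s.length - (s.length - (i + 1) + 1) = i by omega]

theorem stateAt_get (v : List String) (s : List Char) (i j : Nat) (hij : i < j)
    (hj : j ≤ s.length) :
    PySem.List.pyGetD (stateAt v s (i + 1)) (((s.length : Nat) : Int) - (j : Int)) []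
      = EB v (s.drop j) := by
  rw [show ((s.length : Nat) : Int) - (j : Int) = ((s.length - j : Nat) : Int) by omega]
  rw [PySem.List.pyGetD_natCast]
  unfold stateAt
  rw [PySem.List.getD_map_range _ _ _ _ (by omega)]
  rw [show s.length - (s.length - j) = j by omega]

theorem inner_eq (v : List String) (s : List Char) (i : Nat) (_hi : i < s.length) :
    ∀ (d : Nat) (acc : List (List (List String))), i + d ≤ s.length →
    (PySem.List.pyRange ((i + d : Nat) : Int) ((i : Nat) : Int) (-1)).foldl
        (istep v s (i : Int) (stateAt v s (i + 1))) acc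
      = acc ++ EBa v (s.drop i) d := by
  intro d
  induction d with
  | zero =>
    intro acc _
    rw [show ((i + 0 : Nat) : Int) = ((i : Nat) : Int) by norm_num,
      PySem.List.pyRange_neg_one_eq_nil le_rfl, List.foldl_nil, EBa_zero]
    simp
  | succ d ih =>
    intro acc hd
    rw [PySem.List.pyRange_neg_one_cons (by push_cast; omega), List.foldl_cons]
    rw [show ((i + (d + 1) : Nat) : Int) - 1 = ((i + d : Nat) : Int) by push_cast; ring]
    have hstep : istep v s (i : Int) (stateAt v s (i + 1)) acc ((i + (d + 1) : Nat) : Int)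
        = acc ++ (if Mf v ((s.drop i).take (d + 1)) = [] then []
            else (EB v ((s.drop i).drop (d + 1))).map (Mf v ((s.drop i).take (d + 1)) :: ·)) := by
      unfold istep
      rw [mtch_eq v s i d hd]
      by_cases hM : Mf v ((s.drop i).take (d + 1)) = []
      · rw [if_pos (by rw [hM]; rfl), if_pos hM]
        simp
      · rw [if_neg (by rw [List.isEmpty_iff]; exact hM), if_neg hM]
        rw [stateAt_get v s i (i + (d + 1)) (by omega) (by omega)]
        rw [show s.drop (i + (d + 1)) = (s.drop i).drop (d + 1) by
          rw [List.drop_drop]]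
    rw [hstep, ih _ (by omega), EBa_succ, List.append_assoc]

theorem outer_eq (v : List String) (s : List Char) : ∀ (i : Nat), i ≤ s.length →
    (PySem.List.pyRange ((i : Int) - 1) (-1) (-1)).foldl (ostep v s) (stateAt v s i)
      = stateAt v s 0 := by
  intro i
  induction i with
  | zero =>
    intro _
    rw [show ((0 : Nat) : Int) - 1 = -1 by norm_num, PySem.List.pyRange_neg_one_eq_nil le_rfl,
      List.foldl_nil]
  | succ i ih =>
    intro hi
    rw [show ((i + 1 : Nat) : Int) - 1 = (i : Int) by push_cast; ring]
    rw [PySem.List.pyRange_neg_one_cons (by omega), List.foldl_cons]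
    have hstep : ostep v s (stateAt v s (i + 1)) (i : Int) = stateAt v s i := by
      unfold ostep
      rw [show ((s.length : Nat) : Int) = ((i + (s.length - i) : Nat) : Int) by congr 1; omega]
      rw [inner_eq v s i (by omega) (s.length - i) [] (by omega), List.nil_append]
      have hne : s.drop i ≠ [] := by
        intro hnil
        have := congrArg List.length hnil
        simp at this
        omega
      obtain ⟨d0, u, hdu⟩ : ∃ d0 u, s.drop i = d0 :: u := by
        cases hdrop : s.drop i with
        | nil => exact absurd hdrop hne
        | cons d0 u => exact ⟨d0, u, rfl⟩
      rw [show s.length - i = (s.drop i).length by simp]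
      rw [stateAt_last v s i (by omega), hdu]
      simp only [List.length_cons]
      rw [← EB_cons]
    rw [hstep]
    exact ih (by omega)

theorem B_eq (string : String) (v : List String) :
    spell_acronym_alt string v = EB v string.toList := by
  unfold spell_acronym_alt
  dsimp only
  simp only [PySem.List.len_eq]
  show PySem.List.pyGetD
      (List.foldl (ostep v string.toList) [[[]]]
        (PySem.List.pyRange (((string.toList.length : Nat) : Int) - 1) (-1) (-1)))
      ((string.toList.length : Nat) : Int) [] = EB v string.toList
  rw [show ([[[]]] : List (List (List (List String))))
      = stateAt v string.toList string.toList.length by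
    unfold stateAt
    rw [show string.toList.length - string.toList.length + 1 = 1 by omega]
    rw [List.range_one, List.map_cons, List.map_nil, Nat.sub_zero, List.drop_length, EB_nil]]
  rw [outer_eq v string.toList string.toList.length le_rfl]
  unfold stateAt
  rw [PySem.List.pyGetD_natCast, PySem.List.getD_map_range _ _ _ _ (by omega)]
  rw [show string.toList.length - string.toList.length = 0 by omega, List.drop_zero]

-- ===== VERDICT (by name: the statement is the Claim_ definition above) =====
theorem spell_acronym_spec : Claim_equal_spell_acronym := by
  intro string vocabulary _ hpre
  unfold Spec_spell_acronym
  rw [A_eq string vocabulary hpre, B_eq string vocabulary]
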